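-- pv_equiv track=rewrite | github.com/jinit24/Scrabble-bot | best_word.py | get_word_on_left
-- ===== SOURCE A (Python) =====
-- def get_word_on_left(board, start_point):
--
-- 	x,y = start_point
-- 	s = ""
--
-- 	for i in range(y, -1, -1):
-- 		if(board[x][i] == " "):
-- 			break
-- 		else:
-- 			s  = board[x][i] + s
--
-- 	return s
-- ===== SOURCE B (Python) =====
-- def get_word_on_left(board, start_point):
--     x, y = start_point
--     if y < 0:
--         return ""
--     row = board[x][:y + 1]
--     i = len(row)
--     while i > 0 and row[i - 1] != " ":
--         i -= 1
--     return "".join(row[i:])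
-- ===== Notes on version B (the rewrite author's own statement) =====
-- stated objective: idiomatic
-- what changed: B slices the row prefix board[x][:y+1] once, finds the start of the trailing non-space run by scanning indices, and joins that suffix, instead of A's index-by-index string-prepend loop with a break.
import Mathlib
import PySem

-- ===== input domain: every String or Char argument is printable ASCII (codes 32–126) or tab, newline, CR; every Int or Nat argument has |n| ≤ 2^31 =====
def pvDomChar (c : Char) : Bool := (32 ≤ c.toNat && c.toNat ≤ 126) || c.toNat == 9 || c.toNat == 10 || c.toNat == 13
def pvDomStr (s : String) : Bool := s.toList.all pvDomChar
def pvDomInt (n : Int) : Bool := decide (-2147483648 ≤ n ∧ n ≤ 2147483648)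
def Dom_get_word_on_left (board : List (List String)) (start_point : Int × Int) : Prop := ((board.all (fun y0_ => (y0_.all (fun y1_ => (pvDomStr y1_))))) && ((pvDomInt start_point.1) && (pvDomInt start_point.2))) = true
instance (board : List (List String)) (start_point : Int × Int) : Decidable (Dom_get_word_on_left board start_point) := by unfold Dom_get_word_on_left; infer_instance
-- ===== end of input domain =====

-- B slices the row prefix once and joins the trailing non-space run, instead of A's
-- index-by-index prepend loop; return-value equivalence on Pre_ (no mutation involved).

-- ===== PORT A =====
-- the loop 'for i in range(y, -1, -1)' with its break, counting i downwards;
-- pyGetD's defaults are only reached on inputs outside Pre_ (where Python A raises IndexError)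
def pvLoopA (board : List (List String)) (x : Int) : Nat → String → String
  | i, s =>
    let c := PySem.List.pyGetD (PySem.List.pyGetD board x []) (i : Int) ""
    if c == " " then s
    else
      match i with
      | 0 => c ++ s
      | n + 1 => pvLoopA board x n (c ++ s)

def get_word_on_left (board : List (List String)) (start_point : Int × Int) : String :=
  let x := start_point.1
  let y := start_point.2
  if y < 0 then "" else pvLoopA board x y.toNat ""

-- ===== PORT B =====
-- 'while i > 0 and row[i-1] != " ": i -= 1'
def pvFindStart (row : List String) : Nat → Nat
  | 0 => 0
  | i + 1 => if (row.getD i "") == " " then i + 1 else pvFindStart row i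

def get_word_on_left_alt (board : List (List String)) (start_point : Int × Int) : String :=
  let x := start_point.1
  let y := start_point.2
  if y < 0 then ""
  else
    let row := PySem.List.slice (PySem.List.pyGetD board x []) none (some (y + 1))
    let i := pvFindStart row row.length
    String.join (PySem.List.slice row (some (i : Int)) none)

-- ===== PRECONDITION & SPEC =====
-- Pre_ excludes exactly the inputs where A raises IndexError: y ≥ 0 with an invalid row
-- index x, or y past the end of the row (the first loop access board[x][y] fails).
def Pre_get_word_on_left (board : List (List String)) (start_point : Int × Int) : Prop :=
  start_point.2 < 0 ∨
    (PySem.Raise.InRange board.length start_point.1 ∧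
      start_point.2 < ((PySem.List.pyGetD board start_point.1 []).length : Int))
instance (board : List (List String)) (start_point : Int × Int) : Decidable (Pre_get_word_on_left board start_point) := by unfold Pre_get_word_on_left; infer_instance

def pvWitness_get_word_on_left : List (List String) × (Int × Int) :=
  ([["c", "a", "t", " ", "d", "o"]], (0, 5))


def Spec_get_word_on_left (board : List (List String)) (start_point : Int × Int) (out : String) : Prop := out = get_word_on_left_alt board start_point
instance (board : List (List String)) (start_point : Int × Int) (out : String) : Decidable (Spec_get_word_on_left board start_point out) := by unfold Spec_get_word_on_left; infer_instance

-- ===== CLAIM (what is proved, stated in full; the proofs are below) =====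
def Claim_equal_get_word_on_left : Prop := ∀ (board : List (List String)) (start_point : Int × Int), Dom_get_word_on_left board start_point → Pre_get_word_on_left board start_point → Spec_get_word_on_left board start_point (get_word_on_left board start_point)


-- ===== LEMMAS AND PROOFS =====

-- the common value both sides compute on a row prefix t: the joined trailing non-space run
def pvWord (t : List String) : String :=
  String.join ((t.reverse.takeWhile (fun c => !(c == " "))).reverse)

theorem join_append_singleton (l : List String) (a : String) :
    String.join (l ++ [a]) = String.join l ++ a := by
  simp [String.join]

theorem pvWord_snoc_space (t : List String) : pvWord (t ++ [" "]) = "" := by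
  simp [pvWord, String.join]

theorem pvWord_snoc (t : List String) (a : String) (h : ¬ (a == " ") = true) :
    pvWord (t ++ [a]) = pvWord t ++ a := by
  simp only [pvWord, List.reverse_append, List.reverse_cons, List.reverse_nil,
    List.nil_append, List.cons_append, List.takeWhile_cons, h]
  simp [join_append_singleton]

theorem pvLoopA_eq (board : List (List String)) (x : Int) (row : List String)
    (hrow : PySem.List.pyGetD board x [] = row) :
    ∀ (i : Nat), i < row.length → ∀ (s : String),
      pvLoopA board x i s = pvWord (row.take (i + 1)) ++ s := by
  intro i
  induction i with
  | zero =>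
    intro hi s
    have ht : row.take 1 = row.take 0 ++ [row[0]] := by
      simp [List.take_succ, List.getElem?_eq_getElem hi]
    rw [pvLoopA]
    simp only [hrow, PySem.List.pyGetD_natCast, Int.toNat_natCast, List.getD_eq_getElem _ _ hi]
    by_cases h : (row[0] == " ") = true
    · simp only [h, if_pos]
      have : row[0] = " " := by simpa using h
      rw [ht, this, pvWord_snoc_space]; simp
    · simp only [h, if_neg, Bool.false_eq_true, not_false_iff]
      rw [ht, pvWord_snoc _ _ h]
      simp [pvWord, String.join]
  | succ n ih =>
    intro hi s
    have hn : n < row.length := by omega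
    have ht : row.take (n + 2) = row.take (n + 1) ++ [row[n + 1]] := by
      simp [List.take_succ, List.getElem?_eq_getElem hi]
    rw [pvLoopA]
    simp only [hrow, PySem.List.pyGetD_natCast, Int.toNat_natCast, List.getD_eq_getElem _ _ hi]
    by_cases h : (row[n + 1] == " ") = true
    · simp only [h, if_pos]
      have : row[n + 1] = " " := by simpa using h
      rw [ht, this, pvWord_snoc_space]; simp
    · simp only [h, if_neg, Bool.false_eq_true, not_false_iff]
      rw [ih hn (row[n + 1] ++ s), ht, pvWord_snoc _ _ h, String.append_assoc]

theorem pvFindStart_le (row : List String) : ∀ n, pvFindStart row n ≤ n := by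
  intro n
  induction n with
  | zero => simp [pvFindStart]
  | succ k ih =>
    rw [pvFindStart]
    split
    · exact le_refl _
    · omega

theorem pvFindStart_drop (row : List String) :
    ∀ n, n ≤ row.length →
      (row.take n).drop (pvFindStart row n)
        = ((row.take n).reverse.takeWhile (fun c => !(c == " "))).reverse := by
  intro n
  induction n with
  | zero => simp [pvFindStart]
  | succ k ih =>
    intro hn
    have hk : k < row.length := by omega
    have ht : row.take (k + 1) = row.take k ++ [row[k]] := by
      rw [List.take_succ, List.getElem?_eq_getElem hk]
      simp
    have hget : row.getD k "" = row[k] := List.getD_eq_getElem _ _ hk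
    rw [pvFindStart, hget, ht]
    by_cases h : (row[k] == " ") = true
    · simp only [h, if_pos]
      have hs : row[k] = " " := by simpa using h
      have hlen : (row.take k ++ [row[k]]).length = k + 1 := by
        simp [List.length_take]
        omega
      rw [List.drop_eq_nil_of_le (le_of_eq hlen)]
      rw [List.reverse_append]
      simp [hs, List.takeWhile_cons]
    · simp only [h, if_neg, Bool.false_eq_true, not_false_iff]
      have hle : pvFindStart row k ≤ (row.take k).length := by
        rw [List.length_take, Nat.min_eq_left (le_of_lt hk)]
        exact pvFindStart_le row k
      rw [List.drop_append_of_le_length hle, ih (le_of_lt hk)]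
      simp only [List.reverse_append, List.reverse_cons, List.reverse_nil, List.nil_append,
        List.cons_append, List.takeWhile_cons, h]
      simp

theorem alt_eq_pvWord (board : List (List String)) (x y : Int) (row : List String)
    (hrow : PySem.List.pyGetD board x [] = row) (hy : 0 ≤ y) :
    get_word_on_left_alt board (x, y) = pvWord (row.take (y.toNat + 1)) := by
  have hcond : ¬ (((x, y) : Int × Int).2 < 0) := by simpa using hy
  have hslice : PySem.List.slice row none (some (y + 1)) = row.take (y.toNat + 1) := by
    rw [PySem.List.slice_to row (by omega)]
    congr 1
    omega
  simp only [get_word_on_left_alt, hrow, if_neg hcond, hslice]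
  rw [PySem.List.slice_from _ (by positivity), Int.toNat_natCast]
  set t := row.take (y.toNat + 1) with ht
  have h2 := pvFindStart_drop t t.length (le_of_eq rfl)
  rw [List.take_length] at h2
  rw [h2]
  simp [pvWord]

-- ===== VERDICT (by name: the statement is the Claim_ definition above) =====
theorem get_word_on_left_spec : Claim_equal_get_word_on_left := by
  unfold Claim_equal_get_word_on_left
  intro board start_point _ hpre
  obtain ⟨x, y⟩ := start_point
  unfold Spec_get_word_on_left
  by_cases hy : y < 0
  · unfold get_word_on_left get_word_on_left_alt
    simp [hy]
  · push_neg at hy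
    rcases hpre with h | ⟨_, hlen⟩
    · omega
    · set row := PySem.List.pyGetD board x [] with hrow
      have hylt : y.toNat < row.length := by omega
      unfold get_word_on_left
      simp only [not_lt.mpr hy, if_neg (not_lt.mpr hy)]
      rw [pvLoopA_eq board x row hrow.symm y.toNat hylt ""]
      rw [alt_eq_pvWord board x y row hrow.symm hy]
      simp
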